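-- pv_equiv track=rewrite | github.com/kamil-korwiel/lyrics_with_timestamp | algorythm.py | balk_spread_algorithm
-- ===== SOURCE A (Python) =====
-- def balk_spread_algorithm(original:list[str], gen:list[str], spread:int = 5) -> list[tuple]:
--     len_gen = len(gen)
--     len_original = len(original)
--
--     SPREAD = spread
--
--     index_balk = 0
--
--     index_first_spread_target = 0
--
--     similar_words = []
--
--     for index_original in range(len_original):
--         word = original[index_original]
--
--
--         if SPREAD // 2 + index_balk > index_original:
--             index_first_spread_target = index_balk
--         else:
--             index_first_spread_target = index_original - SPREAD // 2
--
--         for index_spread in range(index_first_spread_target, SPREAD+index_first_spread_target):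
--             if index_spread < len_gen:
--                 if word.lower() == gen[index_spread].lower():
--                     similar_words.append((index_original, index_spread))
--                     index_balk = index_spread + 1
--                     break
--
--     return similar_words
-- ===== SOURCE B (Python) =====
-- def balk_spread_algorithm(original: list[str], gen: list[str], spread: int = 5) -> list[tuple]:
--     # Index gen once: word (lowercased) -> ascending list of its positions.
--     occ = {}
--     for j, w in enumerate(gen):
--         k = w.lower()
--         occ[k] = occ.get(k, []) + [j]
--     half = spread // 2
--     balk = 0
--     out = []
--     for i, word in enumerate(original):
--         lst = occ.get(word.lower(), [])
--         start = balk if balk > i - half else i - half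
--         j = next((p for p in lst if p >= start), None)
--         if j is not None and j < start + spread:
--             out.append((i, j))
--             balk = j + 1
--     return out
-- ===== Notes on version B (the rewrite author's own statement) =====
-- stated objective: faster
-- what changed: A scans a spread-wide window of gen (lowercasing each candidate) for every original word; B builds a dict from each lowercased gen word to its ascending position list once, then per original word takes the first indexed position >= the window start, so the inner scan of gen disappears.
import Mathlib
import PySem

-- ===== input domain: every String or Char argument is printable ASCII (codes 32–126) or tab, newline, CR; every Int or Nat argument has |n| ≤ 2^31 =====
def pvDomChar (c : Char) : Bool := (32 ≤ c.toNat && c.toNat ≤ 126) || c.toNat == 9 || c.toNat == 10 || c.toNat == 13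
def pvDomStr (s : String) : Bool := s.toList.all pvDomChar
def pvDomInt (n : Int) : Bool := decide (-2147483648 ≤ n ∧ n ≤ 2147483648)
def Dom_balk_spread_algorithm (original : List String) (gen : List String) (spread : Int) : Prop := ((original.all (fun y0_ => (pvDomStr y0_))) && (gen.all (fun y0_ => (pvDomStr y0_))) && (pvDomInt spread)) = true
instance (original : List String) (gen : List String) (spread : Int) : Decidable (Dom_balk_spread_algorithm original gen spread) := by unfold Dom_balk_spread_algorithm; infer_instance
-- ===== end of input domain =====

-- B replaces A's per-word scan of a spread-wide window of gen by a dict mapping each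
-- lowercased gen word to its ascending list of positions, looked up once per original word
-- (objective: alternative — the inner window scan over gen disappears).

-- ===== PORT A =====
-- inner 'for index_spread in range(...)' with break: returns the first matching index
def pvInnerA (gen : List String) (word : String) : List Int → Option Int
  | [] => none
  | j :: rest =>
    if j < (gen.length : Int) then
      if PySem.Str.lower word = PySem.Str.lower (PySem.List.pyGetD gen j "") then some j
      else pvInnerA gen word rest
    else pvInnerA gen word rest

def balk_spread_algorithm (original : List String) (gen : List String) (spread : Int) : List (Int × Int) :=
  let len_original : Int := (original.length : Int)
  let r := (PySem.List.pyRange 0 len_original 1).foldl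
    (fun (st : Int × List (Int × Int)) index_original =>
      let word := PySem.List.pyGetD original index_original ""
      let index_first_spread_target : Int :=
        if PySem.Int.floordiv spread 2 + st.1 > index_original then st.1
        else index_original - PySem.Int.floordiv spread 2
      match pvInnerA gen word (PySem.List.pyRange index_first_spread_target (spread + index_first_spread_target) 1) with
      | some j => (j + 1, st.2 ++ [(index_original, j)])
      | none => st)
    (0, [])
  r.2

-- ===== PORT B =====
-- occ[k] = occ.get(k, []) + [j] over enumerate(gen)
def pvBuildOcc (gen : List String) : PySem.Dict String (List Int) :=
  (PySem.List.enumerate gen).foldl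
    (fun d jw => d.modify (PySem.Str.lower jw.2) [] (fun l => l ++ [jw.1]))
    PySem.Dict.empty

def balk_spread_algorithm_alt (original : List String) (gen : List String) (spread : Int) : List (Int × Int) :=
  let occ := pvBuildOcc gen
  let half := PySem.Int.floordiv spread 2
  let r := (PySem.List.enumerate original).foldl
    (fun (st : Int × List (Int × Int)) iw =>
      let lst := occ.getD (PySem.Str.lower iw.2) []
      let start := if st.1 > iw.1 - half then st.1 else iw.1 - half
      match lst.find? (fun p => start ≤ p) with
      | some j => if j < start + spread then (j + 1, st.2 ++ [(iw.1, j)]) else st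
      | none => st)
    (0, [])
  r.2

-- ===== PRECONDITION & SPEC =====
def Spec_balk_spread_algorithm (original : List String) (gen : List String) (spread : Int) (out : List (Int × Int)) : Prop := out = balk_spread_algorithm_alt original gen spread
instance (original : List String) (gen : List String) (spread : Int) (out : List (Int × Int)) : Decidable (Spec_balk_spread_algorithm original gen spread out) := by unfold Spec_balk_spread_algorithm; infer_instance

-- ===== CLAIM (what is proved, stated in full; the proofs are below) =====
def Claim_equal_balk_spread_algorithm : Prop := ∀ (original : List String) (gen : List String) (spread : Int), Dom_balk_spread_algorithm original gen spread → Spec_balk_spread_algorithm original gen spread (balk_spread_algorithm original gen spread)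

-- ===== LEMMAS AND PROOFS =====

-- the occurrence list B looks up: positions of key in gen (lowercased), ascending
def pvOccList (gen : List String) (key : String) : List Int :=
  (((PySem.List.enumerate gen).map (fun jw => (PySem.Str.lower jw.2, jw.1))).filter
    (fun p => p.1 == key)).map (fun p => p.2)

lemma pvBuildOcc_getD (gen : List String) (key : String) :
    (pvBuildOcc gen).getD key [] = pvOccList gen key := by
  unfold pvBuildOcc pvOccList
  rw [← List.foldl_map (f := fun (jw : Int × String) => (PySem.Str.lower jw.2, jw.1))
      (g := fun (d : PySem.Dict String (List Int)) (p : String × Int) =>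
        d.modify p.1 [] (fun l => l ++ [p.2]))]
  rw [PySem.Dict.getD_foldl_modify_append]
  simp

lemma pvOccList_pairwise (gen : List String) (key : String) :
    (pvOccList gen key).Pairwise (· < ·) := by
  unfold pvOccList
  refine List.Pairwise.map (R := fun (p q : String × Int) => p.2 < q.2) Prod.snd
    (fun a b h => h) ?_
  refine List.Pairwise.filter _ ?_
  refine List.Pairwise.map (R := fun (p q : Int × String) => p.1 < q.1) _
    (fun a b h => h) ?_
  exact PySem.List.pairwise_lt_enumerate gen 0

lemma pvOccList_mem (gen : List String) (key : String) (x : Int) :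
    x ∈ pvOccList gen key ↔ ∃ (k : Nat), ∃ (_ : k < gen.length),
      x = (k : Int) ∧ PySem.Str.lower gen[k] = key := by
  unfold pvOccList
  simp [List.mem_map, List.mem_filter, PySem.List.mem_enumerate_iff]
  constructor
  · rintro ⟨k, ⟨hk, hkey⟩, hx⟩; exact ⟨k, hx.symm, hk, hkey⟩
  · rintro ⟨k, hx, hk, hkey⟩; exact ⟨k, ⟨hk, hkey⟩, hx.symm⟩

lemma pvOccList_nonneg (gen : List String) (key : String) (x : Int)
    (h : x ∈ pvOccList gen key) : 0 ≤ x := by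
  rcases (pvOccList_mem gen key x).mp h with ⟨k, hk, rfl, _⟩; omega

-- A's inner test holds exactly on members of B's occurrence list (for nonnegative indices)
lemma pvQ_iff (gen : List String) (word : String) (x : Int) (hx : 0 ≤ x) :
    ((decide (x < (gen.length : Int)) &&
      decide (PySem.Str.lower word = PySem.Str.lower (PySem.List.pyGetD gen x ""))) = true)
    ↔ x ∈ pvOccList gen (PySem.Str.lower word) := by
  rw [pvOccList_mem]
  simp only [Bool.and_eq_true, decide_eq_true_eq]
  constructor
  · rintro ⟨h1, h2⟩
    have hlt : x.toNat < gen.length := by omega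
    refine ⟨x.toNat, hlt, by omega, ?_⟩
    rw [PySem.List.pyGetD_of_nonneg _ _ hx, List.getD_eq_getElem _ _ hlt] at h2
    exact h2.symm
  · rintro ⟨k, hk, rfl, hkey⟩
    refine ⟨by omega, ?_⟩
    rw [PySem.List.pyGetD_of_nonneg _ _ hx, Int.toNat_natCast, List.getD_eq_getElem _ _ hk]
    exact hkey.symm

-- find? on a strictly ascending list returns the least element satisfying p
lemma pvFind?_sorted_iff {l : List Int} (hl : l.Pairwise (· < ·)) (p : Int → Bool) (j : Int) :
    l.find? p = some j ↔ j ∈ l ∧ p j = true ∧ ∀ x ∈ l, p x = true → j ≤ x := by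
  induction l with
  | nil => simp
  | cons a t ih =>
    rcases List.pairwise_cons.mp hl with ⟨ha, ht⟩
    by_cases hpa : p a = true
    · rw [List.find?_cons_of_pos hpa]
      constructor
      · rintro h
        injection h with h; subst h
        refine ⟨List.mem_cons_self, hpa, fun x hx _ => ?_⟩
        rcases List.mem_cons.mp hx with rfl | hx
        · exact le_refl _
        · exact le_of_lt (ha x hx)
      · rintro ⟨hj, hpj, hmin⟩
        rcases List.mem_cons.mp hj with rfl | hj
        · rfl
        · exact absurd (hmin a List.mem_cons_self hpa) (not_le.mpr (ha j hj))
    · rw [List.find?_cons_of_neg hpa, ih ht]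
      constructor
      · rintro ⟨hj, hpj, hmin⟩
        refine ⟨List.mem_cons_of_mem _ hj, hpj, fun x hx hpx => ?_⟩
        rcases List.mem_cons.mp hx with rfl | hx
        · exact absurd hpx hpa
        · exact hmin x hx hpx
      · rintro ⟨hj, hpj, hmin⟩
        rcases List.mem_cons.mp hj with rfl | hj
        · exact absurd hpj hpa
        · exact ⟨hj, hpj, fun x hx hpx => hmin x (List.mem_cons_of_mem _ hx) hpx⟩

lemma pvInnerA_eq_find? (gen : List String) (word : String) (l : List Int) :
    pvInnerA gen word l =
      l.find? (fun j => decide (j < (gen.length : Int)) &&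
        decide (PySem.Str.lower word = PySem.Str.lower (PySem.List.pyGetD gen j ""))) := by
  induction l with
  | nil => rfl
  | cons a t ih =>
    unfold pvInnerA
    rw [List.find?_cons]
    by_cases h1 : a < (gen.length : Int) <;>
      by_cases h2 : PySem.Str.lower word = PySem.Str.lower (PySem.List.pyGetD gen a "") <;>
        simp [h1, h2, ih]

-- the core step equivalence: A's window scan = B's first-occurrence-≥-start lookup
lemma pvStep_eq (gen : List String) (word : String) (start spread : Int) (h0 : 0 ≤ start) :
    pvInnerA gen word (PySem.List.pyRange start (spread + start) 1) =
      (match (pvOccList gen (PySem.Str.lower word)).find? (fun p => start ≤ p) with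
       | some j => if j < start + spread then some j else none
       | none => none) := by
  rw [pvInnerA_eq_find?]
  have hlst := pvOccList_pairwise gen (PySem.Str.lower word)
  have hW := PySem.List.pairwise_lt_pyRange_one start (spread + start)
  cases hfind : (pvOccList gen (PySem.Str.lower word)).find? (fun p => decide (start ≤ p)) with
  | none =>
    rw [List.find?_eq_none] at hfind
    rw [List.find?_eq_none.mpr]
    intro x hxW hq
    have hxr := PySem.List.mem_pyRange_one.mp hxW
    have hxl := (pvQ_iff gen word x (by omega)).mp hq
    exact absurd (decide_eq_true (by omega : start ≤ x)) (by simpa using hfind x hxl)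
  | some j =>
    obtain ⟨hjl, hjs, hjmin⟩ := (pvFind?_sorted_iff hlst _ j).mp hfind
    have hj0 : 0 ≤ j := pvOccList_nonneg _ _ _ hjl
    have hjstart : start ≤ j := of_decide_eq_true hjs
    by_cases hjw : j < start + spread
    · simp only [hjw, if_pos]
      rw [(pvFind?_sorted_iff hW _ j).mpr]
      refine ⟨PySem.List.mem_pyRange_one.mpr ⟨hjstart, by omega⟩,
        (pvQ_iff gen word j hj0).mpr hjl, ?_⟩
      intro x hxW hq
      have hxr := PySem.List.mem_pyRange_one.mp hxW
      have hxl := (pvQ_iff gen word x (by omega)).mp hq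
      exact hjmin x hxl (decide_eq_true (by omega))
    · simp only [hjw, if_false]
      rw [List.find?_eq_none.mpr]
      intro x hxW hq
      have hxr := PySem.List.mem_pyRange_one.mp hxW
      have hxl := (pvQ_iff gen word x (by omega)).mp hq
      have := hjmin x hxl (decide_eq_true (by omega : start ≤ x))
      omega

-- named loop bodies of the two ports
def pvStepA (original gen : List String) (spread : Int)
    (st : Int × List (Int × Int)) (index_original : Int) : Int × List (Int × Int) :=
  let word := PySem.List.pyGetD original index_original ""
  let index_first_spread_target : Int :=
    if PySem.Int.floordiv spread 2 + st.1 > index_original then st.1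
    else index_original - PySem.Int.floordiv spread 2
  match pvInnerA gen word (PySem.List.pyRange index_first_spread_target (spread + index_first_spread_target) 1) with
  | some j => (j + 1, st.2 ++ [(index_original, j)])
  | none => st

def pvStepB (gen : List String) (spread : Int)
    (st : Int × List (Int × Int)) (iw : Int × String) : Int × List (Int × Int) :=
  let lst := (pvBuildOcc gen).getD (PySem.Str.lower iw.2) []
  let start := if st.1 > iw.1 - PySem.Int.floordiv spread 2 then st.1
               else iw.1 - PySem.Int.floordiv spread 2
  match lst.find? (fun p => start ≤ p) with
  | some j => if j < start + spread then (j + 1, st.2 ++ [(iw.1, j)]) else st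
  | none => st

lemma portA_eq (original gen : List String) (spread : Int) :
    balk_spread_algorithm original gen spread =
      ((PySem.List.pyRange 0 (original.length : Int) 1).foldl (pvStepA original gen spread) (0, [])).2 := rfl

lemma portB_eq (original gen : List String) (spread : Int) :
    balk_spread_algorithm_alt original gen spread =
      ((PySem.List.enumerate original).foldl (pvStepB gen spread) (0, [])).2 := rfl

-- one step of A equals one step of B (same state, nonnegative index), and keeps the state nonnegative
lemma pvStepAB (original gen : List String) (spread : Int)
    (st : Int × List (Int × Int)) (hst : 0 ≤ st.1) (i : Int) (_hi : 0 ≤ i) :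
    pvStepA original gen spread st i = pvStepB gen spread st (i, PySem.List.pyGetD original i "")
    ∧ 0 ≤ (pvStepA original gen spread st i).1 := by
  unfold pvStepA pvStepB
  simp only []
  have hcond : (PySem.Int.floordiv spread 2 + st.1 > i) ↔ (st.1 > i - PySem.Int.floordiv spread 2) := by omega
  set s : Int := if st.1 > i - PySem.Int.floordiv spread 2 then st.1
                 else i - PySem.Int.floordiv spread 2 with hs
  have hstart : (if PySem.Int.floordiv spread 2 + st.1 > i then st.1
      else i - PySem.Int.floordiv spread 2) = s := by
    rw [hs]; split_ifs with h1 h2 <;> omega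
  have hs0 : 0 ≤ s := by rw [hs]; split_ifs <;> omega
  rw [hstart, pvBuildOcc_getD, pvStep_eq gen _ s spread hs0]
  cases hfind : (pvOccList gen (PySem.Str.lower (PySem.List.pyGetD original i ""))).find?
      (fun p => decide (s ≤ p)) with
  | none => exact ⟨rfl, hst⟩
  | some j =>
    have hj0 : 0 ≤ j := pvOccList_nonneg _ _ _ (List.mem_of_find?_eq_some hfind)
    by_cases hjw : j < s + spread
    · simp only [hjw, if_pos]
      exact ⟨trivial, by omega⟩
    · simp only [hjw, if_false]
      exact ⟨trivial, hst⟩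

-- the two folds agree on any list of nonnegative indices from any nonnegative state
lemma pvFold_eq (original gen : List String) (spread : Int) (l : List Int)
    (hl : ∀ i ∈ l, 0 ≤ i) (st : Int × List (Int × Int)) (hst : 0 ≤ st.1) :
    l.foldl (pvStepA original gen spread) st =
      l.foldl (fun s j => pvStepB gen spread s (j, PySem.List.pyGetD original j "")) st := by
  induction l generalizing st with
  | nil => rfl
  | cons a t ih =>
    have ha : 0 ≤ a := hl a List.mem_cons_self
    obtain ⟨hstep, hpos⟩ := pvStepAB original gen spread st hst a ha
    simp only [List.foldl_cons]
    rw [← hstep, ih (fun i hi => hl i (List.mem_cons_of_mem _ hi)) _ hpos]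

-- ===== VERDICT (by name: the statement is the Claim_ definition above) =====
theorem balk_spread_algorithm_spec : Claim_equal_balk_spread_algorithm := by
  intro original gen spread _
  unfold Spec_balk_spread_algorithm
  rw [portA_eq, portB_eq,
    PySem.List.enumerate_eq_map_pyRange original "", List.foldl_map]
  have := pvFold_eq original gen spread (PySem.List.pyRange 0 (PySem.List.len original) 1)
    (fun i hi => (PySem.List.mem_pyRange_one.mp hi).1) (0, []) (le_refl 0)
  simp only [PySem.List.len_eq] at this ⊢
  rw [this]
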